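-- pv_equiv track=rewrite | github.com/ialdaba/Python-SQL-HW | Encoder-Decoder-Proj/ialdaba_205_P5.py | combine_mapping
-- ===== SOURCE A (Python) =====
-- def is_valid_mapping(mapping):
--
--     # valid only if their keys are all the same length, their values are all the
--     # same length, their keys are unique, and their values are unique
--
--     keys_list = []
--     vals_list = []
--
--     result = True
--     # create keys_list
--     for key in mapping.keys():
--         keys_list.append(key)
--
--     standard_key = len(keys_list[0])
--
--     # create vals_list
--     #for val in mapping.values():
--         #vals_list.append(val)
--     vals_list = list(mapping.values())
--
--     standard_val = len(vals_list[0])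
--
--     for key in keys_list:
--         # keys are same length
--         if len(key) != standard_key:
--             result = False
--         # keys are unique
--         count = 0
--         for element in keys_list:
--             if element == key:
--                 count += 1
--         if count > 1:
--             result = False
--
--     for val in vals_list:
--         # values are same length
--         if len(val) != standard_val:
--             result = False
--         # values are unique
--         count = 0
--         for element in vals_list:
--             if element == val:
--                 count += 1
--         if count > 1:
--             result = False
--
--     return result
--
-- def combine_mapping(mapping1, mapping2):
--
--     mapping = {}
--     merged_keys = list(mapping1.keys()) + list(mapping2.keys())
--     merged_values = list(mapping1.values()) + list(mapping2.values())
--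
--     for i in range(len(merged_keys)):
--         key = merged_keys[i]
--         value = merged_values[i]
--         mapping[key] = value
--
--     for key in mapping1.keys():
--     	if mapping1[key] != mapping[key]:
--     		return None
--
--     for key in mapping2.keys():
--     	if mapping2[key] != mapping[key]:
--     		return None
--
--     if is_valid_mapping(mapping) is False:
--         return None
--
--     if is_valid_mapping(mapping) is True:
--         return mapping
-- ===== SOURCE B (Python) =====
-- def combine_mapping(mapping1, mapping2):
--     # consistency: a key shared by both mappings must carry the same value
--     for k, v in mapping1.items():
--         if k in mapping2 and mapping2[k] != v:
--             return None
--     merged = {**mapping1, **mapping2}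
--     vals = list(merged.values())
--     if len(set(vals)) != len(vals):
--         return None
--     key_lens = {len(k) for k in merged}
--     val_lens = {len(v) for v in vals}
--     if len(key_lens) > 1 or len(val_lens) > 1:
--         return None
--     return merged
-- ===== Notes on version B (the rewrite author's own statement) =====
-- stated objective: simpler
-- what changed: B checks key consistency directly on the two input dicts (dropping A's always-vacuous second loop over mapping2), merges with dict unpacking, and replaces A's quadratic count-based uniqueness scans and per-element length loops by len(set(...)) cardinality tests; the key-uniqueness scan disappears entirely since dict keys are unique.
import Mathlib
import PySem

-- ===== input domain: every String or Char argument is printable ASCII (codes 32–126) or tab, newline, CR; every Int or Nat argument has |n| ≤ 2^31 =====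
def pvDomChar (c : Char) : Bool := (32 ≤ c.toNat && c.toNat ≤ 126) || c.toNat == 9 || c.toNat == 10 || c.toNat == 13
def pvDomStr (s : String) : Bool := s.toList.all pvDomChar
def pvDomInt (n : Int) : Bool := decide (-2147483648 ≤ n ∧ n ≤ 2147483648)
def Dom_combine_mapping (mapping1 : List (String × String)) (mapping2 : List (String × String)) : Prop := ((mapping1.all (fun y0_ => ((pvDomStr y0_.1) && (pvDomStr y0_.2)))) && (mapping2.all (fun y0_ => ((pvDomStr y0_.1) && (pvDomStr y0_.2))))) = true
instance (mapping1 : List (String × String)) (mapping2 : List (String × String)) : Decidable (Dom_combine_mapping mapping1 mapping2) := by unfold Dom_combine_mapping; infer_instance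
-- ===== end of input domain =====

-- B merges with dict-unpacking and replaces A's quadratic count/length scans by set-cardinality tests
-- (objective: simpler); equivalence is about the return value only (neither program mutates its arguments).


-- ===== PORT A =====
-- is_valid_mapping: returns none exactly where the Python raises IndexError (empty mapping).
def pv_is_valid_mapping (mapping : PySem.Dict String String) : Option Bool :=
  let keys_list := mapping.keys
  match PySem.List.pyGet? keys_list 0 with
  | none => none          -- keys_list[0]: IndexError on an empty mapping
  | some k0 =>
    let standard_key := PySem.Str.len k0
    let vals_list := mapping.values
    match PySem.List.pyGet? vals_list 0 with
    | none => none
    | some v0 =>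
      let standard_val := PySem.Str.len v0
      let result : Bool := true
      let result := keys_list.foldl (fun r key =>
        let r := if PySem.Str.len key ≠ standard_key then false else r
        let count : Int := keys_list.foldl (fun c element => if element == key then c + 1 else c) 0
        if count > 1 then false else r) result
      let result := vals_list.foldl (fun r val =>
        let r := if PySem.Str.len val ≠ standard_val then false else r
        let count : Int := vals_list.foldl (fun c element => if element == val then c + 1 else c) 0
        if count > 1 then false else r) result
      some result

def combine_mapping (mapping1 : List (String × String)) (mapping2 : List (String × String)) : Option (List (String × String)) :=
  let m1 : PySem.Dict String String := PySem.Dict.mk mapping1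
  let m2 : PySem.Dict String String := PySem.Dict.mk mapping2
  let merged_keys := m1.keys ++ m2.keys
  let merged_values := m1.values ++ m2.values
  let mapping := (PySem.List.pyRange 0 (merged_keys.length : Int) 1).foldl
      (fun d i => d.insert (PySem.List.pyGetD merged_keys i "") (PySem.List.pyGetD merged_values i "")) PySem.Dict.empty
  if m1.keys.any (fun key => m1.get? key ≠ mapping.get? key) then none
  else if m2.keys.any (fun key => m2.get? key ≠ mapping.get? key) then none
  else match pv_is_valid_mapping mapping with
  | none => none          -- unreachable under Pre_ (mapping nonempty)
  | some b => if b == false then none else if b == true then some mapping.items else none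

-- ===== PORT B =====
def combine_mapping_alt (mapping1 : List (String × String)) (mapping2 : List (String × String)) : Option (List (String × String)) :=
  let d1 : PySem.Dict String String := PySem.Dict.mk mapping1
  let d2 : PySem.Dict String String := PySem.Dict.mk mapping2
  if d1.items.any (fun kv => d2.contains kv.1 && decide (d2.get? kv.1 ≠ some kv.2)) then none
  else
    let merged := d2.items.foldl (fun d kv => d.insert kv.1 kv.2) d1   -- {**mapping1, **mapping2}
    let vals := merged.values
    if (PySem.Set.ofList vals).length ≠ vals.length then none
    else
      let key_lens := PySem.Set.ofList (merged.keys.map PySem.Str.len)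
      let val_lens := PySem.Set.ofList (vals.map PySem.Str.len)
      if key_lens.length > 1 ∨ val_lens.length > 1 then none
      else some merged.items

-- ===== PRECONDITION & SPEC =====
-- Pre_ excludes (a) association lists with duplicate keys, which encode no Python dict, and
-- (b) the input where both mappings are empty, on which A raises IndexError (keys_list[0]).
def Pre_combine_mapping (mapping1 : List (String × String)) (mapping2 : List (String × String)) : Prop :=
  (mapping1.map Prod.fst).Nodup ∧ (mapping2.map Prod.fst).Nodup ∧ ¬(mapping1 = [] ∧ mapping2 = [])
instance (mapping1 : List (String × String)) (mapping2 : List (String × String)) : Decidable (Pre_combine_mapping mapping1 mapping2) := by unfold Pre_combine_mapping; infer_instance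
def pvWitness_combine_mapping : (List (String × String)) × (List (String × String)) :=
  ([("ab", "x"), ("cd", "y")], [("cd", "y"), ("ef", "z")])

def Spec_combine_mapping (mapping1 : List (String × String)) (mapping2 : List (String × String)) (out : Option (List (String × String))) : Prop := out = combine_mapping_alt mapping1 mapping2
instance (mapping1 : List (String × String)) (mapping2 : List (String × String)) (out : Option (List (String × String))) : Decidable (Spec_combine_mapping mapping1 mapping2 out) := by unfold Spec_combine_mapping; infer_instance

-- ===== CLAIM (what is proved, stated in full; the proofs are below) =====
def Claim_equal_combine_mapping : Prop := ∀ (mapping1 : List (String × String)) (mapping2 : List (String × String)), Dom_combine_mapping mapping1 mapping2 → Pre_combine_mapping mapping1 mapping2 → Spec_combine_mapping mapping1 mapping2 (combine_mapping mapping1 mapping2)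


-- ===== LEMMAS AND PROOFS =====

-- proof-side abbreviation: B's merged dict {**mapping1, **mapping2}
def pvMerge (m1 m2 : List (String × String)) : PySem.Dict String String :=
  m2.foldl (fun d kv => d.insert kv.1 kv.2) (PySem.Dict.mk m1)

theorem pv_keys_mk (l : List (String × String)) : (PySem.Dict.mk l).keys = l.map Prod.fst := rfl

-- lookup in a dict built by inserting the (nodup-keyed) pairs of l into d
theorem pv_get?_foldl_ins (l : List (String × String)) (hl : (l.map Prod.fst).Nodup)
    (d : PySem.Dict String String) (x : String) :
    (l.foldl (fun d kv => d.insert kv.1 kv.2) d).get? x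
      = ((PySem.Dict.mk l).get? x).or (d.get? x) := by
  induction l generalizing d with
  | nil =>
    have h0 : (PySem.Dict.mk ([] : List (String × String))).get? x = none := rfl
    simp [h0]
  | cons kv t ih =>
    simp only [List.map_cons, List.nodup_cons] at hl
    rw [List.foldl_cons, ih hl.2, PySem.Dict.get?_mk_cons]
    by_cases hx : kv.1 = x
    · subst hx
      have hnone : (PySem.Dict.mk t).get? kv.1 = none := by
        rw [PySem.Dict.get?_eq_none_iff_not_mem_keys]
        simpa using hl.1
      simp [hnone, PySem.Dict.get?_insert_self]
    · have hb : (kv.1 == x) = false := by simp [hx]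
      rw [PySem.Dict.get?_insert_of_ne (d := d) (v := kv.2) (Ne.symm hx)]
      simp [hb]

-- inserting nodup-keyed pairs into the empty dict rebuilds the dict
theorem pv_ofList_fresh (l : List (String × String)) (hl : (l.map Prod.fst).Nodup) :
    l.foldl (fun d kv => d.insert kv.1 kv.2) PySem.Dict.empty = PySem.Dict.mk l := by
  apply PySem.Dict.ext
  rw [PySem.Dict.items_foldl_insert_fresh l Prod.fst Prod.snd PySem.Dict.empty (by simp) hl]
  simp [PySem.Dict.empty]

-- A's index-loop merged dict equals B's {**mapping1, **mapping2}
theorem pv_mapA_eq (m1 m2 : List (String × String)) (h1 : (m1.map Prod.fst).Nodup) :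
    (PySem.List.pyRange 0 ((((PySem.Dict.mk m1 : PySem.Dict String String).keys ++ (PySem.Dict.mk m2 : PySem.Dict String String).keys).length : Int)) 1).foldl
      (fun d i => d.insert
        (PySem.List.pyGetD ((PySem.Dict.mk m1 : PySem.Dict String String).keys ++ (PySem.Dict.mk m2 : PySem.Dict String String).keys) i "")
        (PySem.List.pyGetD ((PySem.Dict.mk m1 : PySem.Dict String String).values ++ (PySem.Dict.mk m2 : PySem.Dict String String).values) i "")) PySem.Dict.empty
      = pvMerge m1 m2 := by
  set K := (PySem.Dict.mk m1 : PySem.Dict String String).keys ++ (PySem.Dict.mk m2 : PySem.Dict String String).keys with hK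
  set V := (PySem.Dict.mk m1 : PySem.Dict String String).values ++ (PySem.Dict.mk m2 : PySem.Dict String String).values with hV
  have hKV : K.length = V.length := by
    simp [hK, hV, PySem.Dict.keys, PySem.Dict.values]
  have hzip : K.zip V = m1 ++ m2 := by
    rw [hK, hV]
    show ((m1.map Prod.fst) ++ (m2.map Prod.fst)).zip ((m1.map Prod.snd) ++ (m2.map Prod.snd)) = m1 ++ m2
    rw [List.zip_append (by simp), List.zip_map', List.zip_map']
    simp
  have hzlen : ((K.zip V).length : Int) = (K.length : Int) := by
    simp [List.length_zip, hKV]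
  have hcongr : ∀ (d : PySem.Dict String String), ∀ i ∈ PySem.List.pyRange 0 ((K.length : Int)) 1,
      d.insert (PySem.List.pyGetD K i "") (PySem.List.pyGetD V i "")
        = d.insert (PySem.List.pyGetD (K.zip V) i ("", "")).1 (PySem.List.pyGetD (K.zip V) i ("", "")).2 := by
    intro d i hi
    rw [PySem.List.mem_pyRange_one] at hi
    have h0 : (0:Int) ≤ i := hi.1
    have hlt : i.toNat < K.length := by omega
    rw [PySem.List.pyGetD_of_nonneg K "" h0, PySem.List.pyGetD_of_nonneg V "" h0,
        PySem.List.pyGetD_of_nonneg (K.zip V) ("", "") h0]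
    have hltz : i.toNat < (K.zip V).length := by simp [List.length_zip, hKV]; omega
    rw [List.getD_eq_getElem K "" hlt, List.getD_eq_getElem V "" (by omega),
        List.getD_eq_getElem (K.zip V) ("", "") hltz]
    simp [List.getElem_zip]
  rw [PySem.List.foldl_congr_mem _ _ _ _ hcongr]
  rw [← hzlen]
  rw [PySem.List.foldl_pyRange_zero_pyGetD' (K.zip V) ("", "") (fun d kv => d.insert kv.1 kv.2) PySem.Dict.empty]
  rw [hzip, List.foldl_append, pv_ofList_fresh m1 h1]
  rfl

theorem pv_merge_get? (m1 m2 : List (String × String)) (h2 : (m2.map Prod.fst).Nodup) (x : String) :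
    (pvMerge m1 m2).get? x = ((PySem.Dict.mk m2 : PySem.Dict String String).get? x).or ((PySem.Dict.mk m1 : PySem.Dict String String).get? x) :=
  pv_get?_foldl_ins m2 h2 _ x

theorem pv_merge_keys_nodup (m1 m2 : List (String × String)) (h1 : (m1.map Prod.fst).Nodup) :
    (pvMerge m1 m2).keys.Nodup := by
  exact PySem.Dict.nodup_keys_foldl_insert_key m2 Prod.fst (fun _ kv => kv.2) _ (by simpa using h1)

-- a dict lookup at a key that is present returns a value
theorem pv_get?_isSome_of_mem_keys (d : PySem.Dict String String) (k : String) (h : k ∈ d.keys) :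
    ∃ v, d.get? k = some v := by
  cases hg : d.get? k with
  | none => exact absurd ((PySem.Dict.get?_eq_none_iff_not_mem_keys d k).1 hg) (by simp [h])
  | some v => exact ⟨v, rfl⟩

-- len(set(xs)) == len(xs) iff xs has no duplicates
theorem pv_set_len_eq_iff (xs : List String) :
    (PySem.Set.ofList xs).length = xs.length ↔ xs.Nodup := by
  induction xs with
  | nil => simp [PySem.Set.ofList]
  | cons a t ih =>
    rw [PySem.Set.ofList_cons]
    by_cases ha : a ∈ t
    · have hmem : a ∈ PySem.Set.ofList t := (PySem.Set.mem_ofList t a).2 ha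
      have hlt : ((PySem.Set.ofList t).discard a).length < (PySem.Set.ofList t).length := by
        simp only [PySem.Set.discard]
        exact List.length_filter_lt_length_iff_exists.mpr ⟨a, hmem, by simp⟩
      have hle := PySem.Set.length_ofList_le t
      constructor
      · intro h; exfalso; simp at h; omega
      · intro h; exact absurd ha (by simp at h; exact h.1)
    · have hd : (PySem.Set.ofList t).discard a = PySem.Set.ofList t := by
        simp only [PySem.Set.discard]
        apply List.filter_eq_self.2
        intro y hy
        have hyt : y ∈ t := (PySem.Set.mem_ofList t y).1 hy
        have : y ≠ a := fun he => ha (he ▸ hyt)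
        simp [this]
      rw [hd]
      simp [ih, ha]

-- a set built from a nonempty list has at most one element iff all elements are equal
theorem pv_set_le_one_iff (a : Int) (t : List Int) :
    (PySem.Set.ofList (a :: t)).length ≤ 1 ↔ ∀ x ∈ t, x = a := by
  rw [PySem.Set.ofList_cons]
  have hnil : (PySem.Set.ofList t).discard a = [] ↔ ∀ x ∈ t, x = a := by
    constructor
    · intro h x hx
      by_contra hne
      have : x ∈ (PySem.Set.ofList t).discard a :=
        (PySem.Set.mem_discard _ a x).2 ⟨(PySem.Set.mem_ofList t x).2 hx, hne⟩
      rw [h] at this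
      simp at this
    · intro h
      apply List.eq_nil_iff_forall_not_mem.2
      intro x hx
      have hm := (PySem.Set.mem_discard _ a x).1 hx
      exact hm.2 (h x ((PySem.Set.mem_ofList t x).1 hm.1))
  rw [List.length_cons, ← hnil]
  constructor
  · intro h; exact List.length_eq_zero_iff.1 (by omega)
  · intro h; rw [h]; simp

-- one scan loop of is_valid_mapping, as a Boolean any
theorem pv_scan_eq (l : List String) (s0 : String) (b : Bool) :
    l.foldl (fun r x =>
        let r := if PySem.Str.len x ≠ PySem.Str.len s0 then false else r
        let count : Int := l.foldl (fun c element => if element == x then c + 1 else c) 0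
        if count > 1 then false else r) b
      = (b && !(l.any (fun x => decide (((l.count x : Int)) > 1) || decide (PySem.Str.len x ≠ PySem.Str.len s0)))) := by
  rw [PySem.List.foldl_congr_mem _ _
      (fun r x => if (decide (((l.count x : Int)) > 1) || decide (PySem.Str.len x ≠ PySem.Str.len s0)) = true then false else r) b ?_]
  · exact PySem.List.foldl_if_false_eq _ l b
  · intro r x hx
    rw [PySem.List.foldl_beq_add_one l x 0]
    by_cases hc : ((l.count x : Int)) > 1
    · simp [hc]
    · simp [hc]


-- the two count/length scans of is_valid_mapping, as one Boolean
theorem pv_is_valid_eq (d : PySem.Dict String String) (k0 v0 : String) (kt vt : List String)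
    (hk : d.keys = k0 :: kt) (hv : d.values = v0 :: vt) :
    pv_is_valid_mapping d = some (
      (!(d.keys.any (fun key => decide (((d.keys.count key : Int)) > 1) || decide (PySem.Str.len key ≠ PySem.Str.len k0)))) &&
      (!(d.values.any (fun v => decide (((d.values.count v : Int)) > 1) || decide (PySem.Str.len v ≠ PySem.Str.len v0))))) := by
  unfold pv_is_valid_mapping
  rw [hk, hv]
  have hg1 : PySem.List.pyGet? (k0 :: kt) 0 = some k0 := by
    simp [PySem.List.pyGet?, PySem.List.pyIdx?]
  have hg2 : PySem.List.pyGet? (v0 :: vt) 0 = some v0 := by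
    simp [PySem.List.pyGet?, PySem.List.pyIdx?]
  simp only [hg1, hg2]
  rw [pv_scan_eq (k0 :: kt) k0 true, pv_scan_eq (v0 :: vt) v0]
  simp

theorem pv_main (m1 m2 : List (String × String)) (h1 : (m1.map Prod.fst).Nodup)
    (h2 : (m2.map Prod.fst).Nodup) (hne : ¬(m1 = [] ∧ m2 = [])) :
    combine_mapping m1 m2 = combine_mapping_alt m1 m2 := by
  simp only [combine_mapping, combine_mapping_alt]
  rw [pv_mapA_eq m1 m2 h1]
  have hfold : List.foldl (fun d kv => d.insert kv.1 kv.2) (PySem.Dict.mk m1) m2 = pvMerge m1 m2 := rfl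
  rw [hfold]
  set M := pvMerge m1 m2 with hM
  have hKn : M.keys.Nodup := pv_merge_keys_nodup m1 m2 h1
  have hkeysU : M.keys = PySem.Set.update (PySem.Dict.mk m1 : PySem.Dict String String).keys (m2.map Prod.fst) :=
    PySem.Dict.keys_foldl_insert_key m2 Prod.fst (fun _ kv => kv.2) _
  have hkeys_ne : M.keys ≠ [] := by
    rcases m1 with _ | ⟨p, t1⟩
    · rcases m2 with _ | ⟨q, t2⟩
      · exact absurd ⟨rfl, rfl⟩ hne
      · intro h
        have hqm : q.1 ∈ M.keys := by
          rw [hkeysU]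
          exact (PySem.Set.mem_update _ _ _).2 (Or.inr (by simp))
        rw [h] at hqm
        simp at hqm
    · intro h
      have hpm : p.1 ∈ M.keys := by
        rw [hkeysU]
        exact (PySem.Set.mem_update _ _ _).2 (Or.inl (by simp))
      rw [h] at hpm
      simp at hpm
  obtain ⟨k0, kt, hk⟩ : ∃ k0 kt, M.keys = k0 :: kt := by
    cases hkc : M.keys with
    | nil => exact absurd hkc hkeys_ne
    | cons a b => exact ⟨a, b, rfl⟩
  have hvlen : M.values.length = M.keys.length := by
    simp [PySem.Dict.keys, PySem.Dict.values]
  obtain ⟨v0, vt, hv⟩ : ∃ v0 vt, M.values = v0 :: vt := by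
    cases hvc : M.values with
    | nil => rw [hvc, hk] at hvlen; simp at hvlen
    | cons a b => exact ⟨a, b, rfl⟩
  -- the first early-return loop of A coincides with B's consistency test
  have hget1 : ∀ kv ∈ m1, (PySem.Dict.mk m1 : PySem.Dict String String).get? kv.1 = some kv.2 := by
    intro kv hkv
    exact PySem.Dict.get?_of_mem_items (PySem.Dict.mk m1) (by simpa using hkv) (by simpa using h1)
  have hany1 : ((PySem.Dict.mk m1 : PySem.Dict String String).keys.any fun key =>
        decide ((PySem.Dict.mk m1 : PySem.Dict String String).get? key ≠ M.get? key))
      = (m1.any fun kv => (PySem.Dict.mk m2 : PySem.Dict String String).contains kv.1 &&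
          decide ((PySem.Dict.mk m2 : PySem.Dict String String).get? kv.1 ≠ some kv.2)) := by
    rw [pv_keys_mk, List.any_map]
    apply PySem.List.any_congr_mem
    intro kv hkv
    have hg := hget1 kv hkv
    have hMg : M.get? kv.1 = ((PySem.Dict.mk m2 : PySem.Dict String String).get? kv.1).or
        ((PySem.Dict.mk m1 : PySem.Dict String String).get? kv.1) := pv_merge_get? m1 m2 h2 kv.1
    have hcont : (PySem.Dict.mk m2 : PySem.Dict String String).contains kv.1
        = ((PySem.Dict.mk m2 : PySem.Dict String String).get? kv.1).isSome :=
      PySem.Dict.contains_eq_isSome_get? _ _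
    cases hc : (PySem.Dict.mk m2 : PySem.Dict String String).get? kv.1 with
    | none => simp [Function.comp, hg, hMg, hc, hcont]
    | some w =>
      simp only [Function.comp, hg, hMg, hc, hcont, Option.or_some, Option.isSome_some, Bool.true_and]
      by_cases hw : w = kv.2
      · simp [hw]
      · have hw' : ¬ kv.2 = w := fun he => hw he.symm
        simp [hw, hw']
  -- A's second loop never fires: mapping2 overrides in the merged dict
  have hany2 : ((PySem.Dict.mk m2 : PySem.Dict String String).keys.any fun key =>
        decide ((PySem.Dict.mk m2 : PySem.Dict String String).get? key ≠ M.get? key)) = false := by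
    rw [List.any_eq_false]
    intro k hkmem
    obtain ⟨v, hv2⟩ := pv_get?_isSome_of_mem_keys (PySem.Dict.mk m2) k hkmem
    have hMg : M.get? k = ((PySem.Dict.mk m2 : PySem.Dict String String).get? k).or
        ((PySem.Dict.mk m1 : PySem.Dict String String).get? k) := pv_merge_get? m1 m2 h2 k
    simp [hMg, hv2]
  rw [hany1, hany2]
  rw [pv_is_valid_eq M k0 v0 kt vt hk hv]
  -- keys of the merged dict are unique, so A's key-count scan is vacuous
  have hkey_cnt : (M.keys.any fun key => decide (((M.keys.count key : Int)) > 1) ||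
        decide (PySem.Str.len key ≠ PySem.Str.len k0))
      = (M.keys.any fun key => decide (PySem.Str.len key ≠ PySem.Str.len k0)) := by
    apply PySem.List.any_congr_mem
    intro x hx
    have hC : M.keys.count x = 1 := List.count_eq_one_of_mem hKn hx
    simp [hC]
  rw [hkey_cnt]
  have hc1 : (PySem.Set.ofList M.values).length ≠ M.values.length ↔ ¬ M.values.Nodup :=
    not_congr (pv_set_len_eq_iff M.values)
  have hKiff : (M.keys.any fun key => decide (PySem.Str.len key ≠ PySem.Str.len k0)) = false ↔
      (PySem.Set.ofList (M.keys.map PySem.Str.len)).length ≤ 1 := by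
    rw [hk, List.map_cons, pv_set_le_one_iff]
    simp only [List.any_eq_false]
    constructor
    · intro h y hy
      obtain ⟨x, hx, rfl⟩ := List.mem_map.1 hy
      have := h x (List.mem_cons_of_mem _ hx)
      simpa using this
    · intro h x hx
      rcases List.mem_cons.1 hx with rfl | hx'
      · simp
      · have hlx := h (PySem.Str.len x) (List.mem_map_of_mem hx')
        simpa [PySem.Str.len_eq] using hlx
  have hViff : (M.values.any fun v => decide (PySem.Str.len v ≠ PySem.Str.len v0)) = false ↔
      (PySem.Set.ofList (M.values.map PySem.Str.len)).length ≤ 1 := by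
    rw [hv, List.map_cons, pv_set_le_one_iff]
    simp only [List.any_eq_false]
    constructor
    · intro h y hy
      obtain ⟨x, hx, rfl⟩ := List.mem_map.1 hy
      have := h x (List.mem_cons_of_mem _ hx)
      simpa using this
    · intro h x hx
      rcases List.mem_cons.1 hx with rfl | hx'
      · simp
      · have hlx := h (PySem.Str.len x) (List.mem_map_of_mem hx')
        simpa [PySem.Str.len_eq] using hlx
  rcases Bool.eq_false_or_eq_true (m1.any fun kv => (PySem.Dict.mk m2 : PySem.Dict String String).contains kv.1 &&
      decide ((PySem.Dict.mk m2 : PySem.Dict String String).get? kv.1 ≠ some kv.2)) with hB | hB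
  · -- a shared key with two different values: both programs return None
    simp only [hB]; simp
  · simp only [hB, Bool.false_eq_true, if_false]
    by_cases HU : M.values.Nodup
    · -- values are unique: the value-count scan is vacuous too
      have hval_cnt : (M.values.any fun v => decide (((M.values.count v : Int)) > 1) ||
            decide (PySem.Str.len v ≠ PySem.Str.len v0))
          = (M.values.any fun v => decide (PySem.Str.len v ≠ PySem.Str.len v0)) := by
        apply PySem.List.any_congr_mem
        intro x hx
        have hC : M.values.count x = 1 := List.count_eq_one_of_mem HU hx
        simp [hC]
      rw [hval_cnt]
      have hlen_eq : (PySem.Set.ofList M.values).length = M.values.length :=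
        (pv_set_len_eq_iff M.values).2 HU
      by_cases HK : (M.keys.any fun key => decide (PySem.Str.len key ≠ PySem.Str.len k0)) = true
      · have hknotle : ¬ (PySem.Set.ofList (M.keys.map PySem.Str.len)).length ≤ 1 := by
          intro hle
          rw [← hKiff] at hle
          rw [HK] at hle
          simp at hle
        have hgt : 1 < (PySem.Set.ofList (M.keys.map PySem.Str.len)).length := by omega
        have hKp : ∃ x ∈ M.keys, ¬ x.length = k0.length := by simpa using HK
        obtain ⟨xk, hxk, hxkbad⟩ := hKp
        simp [hlen_eq, hgt]
        intro hall
        exact absurd (hall xk hxk) hxkbad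
      · have hKf : (M.keys.any fun key => decide (PySem.Str.len key ≠ PySem.Str.len k0)) = false :=
          Bool.not_eq_true _ ▸ (Bool.eq_false_iff.2 (fun h => HK h))
        have hkle : (PySem.Set.ofList (M.keys.map PySem.Str.len)).length ≤ 1 := hKiff.1 hKf
        have hknotgt : ¬ 1 < (PySem.Set.ofList (M.keys.map PySem.Str.len)).length := by omega
        have hKa : ∀ x ∈ M.keys, x.length = k0.length := by simpa using hKf
        by_cases HV : (M.values.any fun v => decide (PySem.Str.len v ≠ PySem.Str.len v0)) = true
        · have hvnotle : ¬ (PySem.Set.ofList (M.values.map PySem.Str.len)).length ≤ 1 := by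
            intro hle
            rw [← hViff] at hle
            rw [HV] at hle
            simp at hle
          have hvgt : 1 < (PySem.Set.ofList (M.values.map PySem.Str.len)).length := by omega
          simp only [HV]
          simp [hlen_eq, hvgt]
        · have hVf : (M.values.any fun v => decide (PySem.Str.len v ≠ PySem.Str.len v0)) = false :=
            Bool.not_eq_true _ ▸ (Bool.eq_false_iff.2 (fun h => HV h))
          have hvle : (PySem.Set.ofList (M.values.map PySem.Str.len)).length ≤ 1 := hViff.1 hVf
          have hvnotgt : ¬ 1 < (PySem.Set.ofList (M.values.map PySem.Str.len)).length := by omega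
          have hVa : ∀ x ∈ M.values, x.length = v0.length := by simpa using hVf
          have hcnt : ∀ x ∈ M.values, List.count x M.values ≤ 1 :=
            fun a _ => List.nodup_iff_count_le_one.1 HU a
          simp only [hKf, hVf]
          simp [hlen_eq, hknotgt, hvnotgt]
    · -- duplicated values: A's count scan trips, B's set-cardinality test trips
      have hx2 : ∃ x, 2 ≤ M.values.count x := by
        by_contra hno
        exact HU (List.nodup_iff_count_le_one.2 (fun a => by
          by_contra hgt2
          exact hno ⟨a, by omega⟩))
      obtain ⟨x, hx2⟩ := hx2
      have hxmem : x ∈ M.values := List.count_pos_iff.1 (by omega)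
      have hva : (M.values.any fun v => decide (((M.values.count v : Int)) > 1) ||
            decide (PySem.Str.len v ≠ PySem.Str.len v0)) = true := by
        rw [List.any_eq_true]
        refine ⟨x, hxmem, ?_⟩
        have : ((M.values.count x : Int)) > 1 := by exact_mod_cast (by omega : (1:Nat) < M.values.count x)
        simp [this]
      have hc1t : (PySem.Set.ofList M.values).length ≠ M.values.length := hc1.2 HU
      simp only [hva]
      simp [hc1t]

-- ===== VERDICT (by name: the statement is the Claim_ definition above) =====
theorem combine_mapping_spec : Claim_equal_combine_mapping := by
  intro m1 m2 _ hpre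
  exact pv_main m1 m2 hpre.1 hpre.2.1 hpre.2.2
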